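-- pv_equiv track=rewrite | github.com/YangJiWoong96/secretary_app | backend/proactive/planner.py | _uniq_trim
-- ===== SOURCE A (Python) =====
-- from typing import Dict, List, Optional, Tuple, TypedDict
--
-- def _uniq_trim(xs: List[str], max_len: int) -> List[str]:
--     seen, acc, cur = set(), [], 0
--     for s in xs:
--         if not s or s in seen:
--             continue
--         seen.add(s)
--         cur += len(s)
--         if cur > max_len:
--             break
--         acc.append(s)
--     return acc
-- ===== SOURCE B (Python) =====
-- from itertools import accumulate, takewhile
--
-- def _uniq_trim(xs, max_len):
--     seen = set()
--     uniq = []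
--     for s in xs:
--         if s and s not in seen:
--             seen.add(s)
--             uniq.append(s)
--     pairs = zip(uniq, accumulate(map(len, uniq)))
--     return [s for s, _ in takewhile(lambda p: p[1] <= max_len, pairs)]
-- ===== Notes on version B (the rewrite author's own statement) =====
-- stated objective: alternative
-- what changed: Replaced the fused early-break loop over (seen, acc, cur) with two separate passes: an ordered dedup of non-empty strings, then a prefix-sum takewhile trim via itertools.accumulate.
import Mathlib
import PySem

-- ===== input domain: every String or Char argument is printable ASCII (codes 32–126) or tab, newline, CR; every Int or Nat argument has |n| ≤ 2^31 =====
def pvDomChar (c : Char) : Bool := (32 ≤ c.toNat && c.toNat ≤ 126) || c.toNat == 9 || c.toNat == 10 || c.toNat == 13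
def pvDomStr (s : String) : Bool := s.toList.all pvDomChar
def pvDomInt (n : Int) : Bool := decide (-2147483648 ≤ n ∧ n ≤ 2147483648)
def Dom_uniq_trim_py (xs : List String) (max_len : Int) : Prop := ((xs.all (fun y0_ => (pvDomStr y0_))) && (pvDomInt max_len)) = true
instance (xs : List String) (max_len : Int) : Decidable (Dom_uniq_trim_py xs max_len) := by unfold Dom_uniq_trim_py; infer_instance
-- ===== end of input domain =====

-- B splits A's fused early-break loop into an ordered dedup pass followed by a prefix-sum takewhile trim (objective: alternative decomposition, same cost).

-- ===== PORT A =====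
-- the 'for s in xs: …' loop with state (seen, acc, cur); 'break' returns acc
def uniqTrimLoopA (max_len : Int) : List String → PySem.Set String → List String → Int → List String
  | [], _, acc, _ => acc
  | s :: rest, seen, acc, cur =>
    if s = "" ∨ PySem.Set.contains seen s then uniqTrimLoopA max_len rest seen acc cur
    else
      let cur' := cur + PySem.Str.len s
      if cur' > max_len then acc
      else uniqTrimLoopA max_len rest (PySem.Set.add seen s) (acc ++ [s]) cur'

def uniq_trim_py (xs : List String) (max_len : Int) : List String :=
  uniqTrimLoopA max_len xs PySem.Set.empty [] 0

-- ===== PORT B =====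
-- pass 1: unique non-empty strings in first-occurrence order (the set-guarded loop of Source B)
def uniqDedupB : List String → PySem.Set String → List String
  | [], _ => []
  | s :: rest, seen =>
    if s ≠ "" ∧ ¬ PySem.Set.contains seen s then s :: uniqDedupB rest (PySem.Set.add seen s)
    else uniqDedupB rest seen

-- pass 2: takewhile over the running prefix sums of the lengths (itertools.accumulate + takewhile)
def uniqTakeB (max_len : Int) : List String → Int → List String
  | [], _ => []
  | s :: rest, cum =>
    let c := cum + PySem.Str.len s
    if c ≤ max_len then s :: uniqTakeB max_len rest c else []

def uniq_trim_py_alt (xs : List String) (max_len : Int) : List String :=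
  uniqTakeB max_len (uniqDedupB xs PySem.Set.empty) 0

-- ===== PRECONDITION & SPEC =====
def Spec_uniq_trim_py (xs : List String) (max_len : Int) (out : List String) : Prop := out = uniq_trim_py_alt xs max_len
instance (xs : List String) (max_len : Int) (out : List String) : Decidable (Spec_uniq_trim_py xs max_len out) := by unfold Spec_uniq_trim_py; infer_instance

-- ===== CLAIM (what is proved, stated in full; the proofs are below) =====
def Claim_equal_uniq_trim_py : Prop := ∀ (xs : List String) (max_len : Int), Dom_uniq_trim_py xs max_len → Spec_uniq_trim_py xs max_len (uniq_trim_py xs max_len)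

-- ===== LEMMAS AND PROOFS =====
theorem loopA_eq_dedup_take (max_len : Int) (xs : List String) :
    ∀ (seen : PySem.Set String) (acc : List String) (cur : Int),
      uniqTrimLoopA max_len xs seen acc cur
        = acc ++ uniqTakeB max_len (uniqDedupB xs seen) cur := by
  induction xs with
  | nil => intro seen acc cur; simp [uniqTrimLoopA, uniqDedupB, uniqTakeB]
  | cons s rest ih =>
    intro seen acc cur
    by_cases h : s = "" ∨ s ∈ seen
    · have h2 : ¬ (¬ s = "" ∧ s ∉ seen) := by tauto
      simp [uniqTrimLoopA, uniqDedupB, h, h2, ih]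
    · have h2 : ¬ s = "" ∧ s ∉ seen := by tauto
      by_cases hc : max_len < cur + (s.length : Int)
      · simp [uniqTrimLoopA, uniqDedupB, uniqTakeB, h2, hc, not_le.mpr hc]
      · simp [uniqTrimLoopA, uniqDedupB, uniqTakeB, h2, not_lt.mp hc, ih]

-- ===== VERDICT (by name: the statement is the Claim_ definition above) =====
theorem uniq_trim_py_spec : Claim_equal_uniq_trim_py := by
  intro xs max_len _
  unfold Spec_uniq_trim_py uniq_trim_py uniq_trim_py_alt
  simpa using loopA_eq_dedup_take max_len xs PySem.Set.empty [] 0
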